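-- pv_equiv track=rewrite | github.com/geetansshh/Job-Autofill | a6_complete_skipped_fields.py | dedup_skipped_by_id
-- ===== SOURCE A (Python) =====
-- from typing import Any, Dict, List, Optional, Tuple
--
-- def dedup_skipped_by_id(skipped_list: List[Dict[str, Any]]) -> List[Dict[str, Any]]:
--     """
--     Keep one item per field id. If both 'personal/preference' and some other reason exist,
--     keep the 'personal/preference' entry. Otherwise, keep the first seen.
--     """
--     chosen: Dict[str, Dict[str, Any]] = {}
--     for item in skipped_list:
--         fid = item.get("id")
--         if not fid:
--             continue
--         if fid not in chosen:
--             chosen[fid] = item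
--         else:
--             # prefer personal/preference reason
--             curr = chosen[fid]
--             if (item.get("reason") == "personal/preference" and curr.get("reason") != "personal/preference"):
--                 chosen[fid] = item
--     # preserve original order of first appearance
--     seen = set()
--     out: List[Dict[str, Any]] = []
--     for item in skipped_list:
--         fid = item.get("id")
--         if not fid or fid in seen:
--             continue
--         if fid in chosen:
--             out.append(chosen[fid])
--             seen.add(fid)
--     return out
-- ===== SOURCE B (Python) =====
-- from typing import Any, Dict, List
--
-- def dedup_skipped_by_id(skipped_list: List[Dict[str, Any]]) -> List[Dict[str, Any]]:
--     """
--     Keep one item per field id, taking the first 'personal/preference' entry for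
--     that id if one exists, else the first entry; first-appearance order.
--
--     Worklist algorithm, no dicts/sets: repeatedly take the head, look ahead in the
--     remaining items for a reason upgrade, then drop every later item with that id.
--     """
--     PREF = "personal/preference"
--     out: List[Dict[str, Any]] = []
--     pending = list(skipped_list)
--     while pending:
--         item = pending[0]
--         pending = pending[1:]
--         fid = item.get("id")
--         if not fid:
--             continue
--         if item.get("reason") == PREF:
--             best = item
--         else:
--             best = next((x for x in pending
--                          if x.get("id") == fid and x.get("reason") == PREF), item)
--         out.append(best)
--         pending = [x for x in pending if x.get("id") != fid]
--     return out
-- ===== Notes on version B (the rewrite author's own statement) =====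
-- stated objective: alternative
-- what changed: Replaces A's dict-plus-set two-pass scheme by a dict-free worklist: take the head item, find its reason upgrade by scanning ahead, emit it, and drop all later items with the same id; trades A's O(n) hashing for an O(n^2) scan with no auxiliary index.
import Mathlib
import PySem

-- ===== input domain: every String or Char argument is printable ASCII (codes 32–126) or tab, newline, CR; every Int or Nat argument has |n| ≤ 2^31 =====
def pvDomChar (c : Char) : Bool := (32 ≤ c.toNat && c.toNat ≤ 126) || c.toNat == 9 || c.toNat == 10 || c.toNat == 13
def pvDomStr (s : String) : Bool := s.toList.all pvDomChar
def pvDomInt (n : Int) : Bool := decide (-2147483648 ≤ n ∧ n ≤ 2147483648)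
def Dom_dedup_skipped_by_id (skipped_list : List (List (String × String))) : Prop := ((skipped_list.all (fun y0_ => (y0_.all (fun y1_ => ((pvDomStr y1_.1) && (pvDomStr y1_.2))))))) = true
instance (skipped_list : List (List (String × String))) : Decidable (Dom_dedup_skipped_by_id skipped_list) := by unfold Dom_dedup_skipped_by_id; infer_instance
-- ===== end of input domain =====

-- B replaces A's dict+set two-pass scheme by a dict-free worklist: emit the head's best
-- (look-ahead for a 'personal/preference' upgrade), then drop later items with that id.
-- Items (Python dicts) are association lists; item.get(k) is first-match lookup (List.lookup).

-- ===== PORT A =====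
def dedup_skipped_by_id (skipped_list : List (List (String × String))) : List (List (String × String)) :=
  let chosen : PySem.Dict String (List (String × String)) :=
    skipped_list.foldl (fun chosen item =>
      match List.lookup "id" item with
      | none => chosen                                  -- item.get("id") is None: falsy, continue
      | some fid =>
        if fid = "" then chosen                         -- empty string is falsy, continue
        else if chosen.contains fid = false then chosen.insert fid item
        else
          let curr := chosen.getD fid []                -- chosen[fid]; key is present in this branch
          if List.lookup "reason" item = some "personal/preference" ∧
              ¬ List.lookup "reason" curr = some "personal/preference"
          then chosen.insert fid item
          else chosen) PySem.Dict.empty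
  -- second pass: preserve original order of first appearance
  let fin :=
    skipped_list.foldl (fun (st : List (List (String × String)) × PySem.Set String) item =>
      match List.lookup "id" item with
      | none => st
      | some fid =>
        if fid = "" ∨ fid ∈ st.2 then st
        else if chosen.contains fid then (st.1 ++ [chosen.getD fid []], PySem.Set.add st.2 fid)
        else st) ([], PySem.Set.empty)
  fin.1

-- ===== PORT B =====
-- while pending: take head, look ahead for a reason upgrade, emit, drop same-id tail items
def altGo (out : List (List (String × String))) (pending : List (List (String × String))) :
    List (List (String × String)) :=
  match pending with
  | [] => out
  | item :: pending =>
    match List.lookup "id" item with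
    | none => altGo out pending                         -- falsy id: continue
    | some fid =>
      if fid = "" then altGo out pending
      else
        let best :=
          if List.lookup "reason" item = some "personal/preference" then item
          else (pending.find? (fun x =>
                  (List.lookup "id" x == some fid) &&
                  (List.lookup "reason" x == some "personal/preference"))).getD item
        altGo (out ++ [best]) (pending.filter (fun x => !(List.lookup "id" x == some fid)))
  termination_by pending.length
  decreasing_by
    all_goals simp
    all_goals exact le_trans (List.length_filter_le _ _) (le_of_eq List.length_attach)

def dedup_skipped_by_id_alt (skipped_list : List (List (String × String))) : List (List (String × String)) :=
  altGo [] skipped_list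

-- ===== PRECONDITION & SPEC =====
def Spec_dedup_skipped_by_id (skipped_list : List (List (String × String))) (out : List (List (String × String))) : Prop := out = dedup_skipped_by_id_alt skipped_list
instance (skipped_list : List (List (String × String))) (out : List (List (String × String))) : Decidable (Spec_dedup_skipped_by_id skipped_list out) := by unfold Spec_dedup_skipped_by_id; infer_instance

-- ===== CLAIM =====
def Claim_equal_dedup_skipped_by_id : Prop := ∀ (skipped_list : List (List (String × String))), Dom_dedup_skipped_by_id skipped_list → Spec_dedup_skipped_by_id skipped_list (dedup_skipped_by_id skipped_list)

-- ===== LEMMAS AND PROOFS =====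

-- the (non-falsy) field id of an item
def pvFid? (item : List (String × String)) : Option String :=
  match List.lookup "id" item with
  | none => none
  | some f => if f = "" then none else some f

-- the per-item update of A's id-keyed dict (its first loop body)
def pvStep (d : PySem.Dict String (List (String × String))) (item : List (String × String)) :
    PySem.Dict String (List (String × String)) :=
  match pvFid? item with
  | none => d
  | some fid =>
    if d.contains fid = false then d.insert fid item
    else if List.lookup "reason" item = some "personal/preference" ∧
        ¬ List.lookup "reason" (d.getD fid []) = some "personal/preference"
      then d.insert fid item
      else d

-- non-falsy ids of xs, first occurrences only, that are not already in seen
def pvNew (xs : List (List (String × String))) (seen : List String) : List String :=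
  match xs with
  | [] => []
  | i :: t =>
    match pvFid? i with
    | none => pvNew t seen
    | some f => if f ∈ seen then pvNew t seen else f :: pvNew t (f :: seen)

def pvPP (f : String) (x : List (String × String)) : Bool :=
  (List.lookup "id" x == some f) && (List.lookup "reason" x == some "personal/preference")

def pvID (f : String) (x : List (String × String)) : Bool :=
  List.lookup "id" x == some f

-- the value A ends up keeping for id f: first 'personal/preference' item, else first item
def pvBest (f : String) (xs : List (List (String × String))) : List (String × String) :=
  match xs.find? (pvPP f) with
  | some x => x
  | none => (xs.find? (pvID f)).getD []

lemma pvStep_eq_A (d : PySem.Dict String (List (String × String))) (item : List (String × String)) :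
    (match List.lookup "id" item with
      | none => d
      | some fid =>
        if fid = "" then d
        else if d.contains fid = false then d.insert fid item
        else
          let curr := d.getD fid []
          if List.lookup "reason" item = some "personal/preference" ∧
              ¬ List.lookup "reason" curr = some "personal/preference"
          then d.insert fid item
          else d) = pvStep d item := by
  simp only [pvStep, pvFid?]
  cases List.lookup "id" item with
  | none => rfl
  | some f => by_cases h : f = "" <;> simp [h]

lemma pvNew_congr (xs : List (List (String × String))) :
    ∀ s s' : List String, (∀ g, g ∈ s ↔ g ∈ s') → pvNew xs s = pvNew xs s' := by
  induction xs with
  | nil => intro s s' _; rfl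
  | cons i t ih =>
    intro s s' h
    simp only [pvNew]
    cases pvFid? i with
    | none => exact ih s s' h
    | some f =>
      by_cases hf : f ∈ s
      · simp [hf, (h f).mp hf, ih s s' h]
      · have hf' : f ∉ s' := fun hx => hf ((h f).mpr hx)
        simp only [hf, hf', if_false]
        rw [ih (f :: s) (f :: s') (by intro g; simp [h g])]

lemma keys_fold (xs : List (List (String × String))) :
    ∀ d : PySem.Dict String (List (String × String)),
      (List.foldl pvStep d xs).keys = d.keys ++ pvNew xs d.keys := by
  induction xs with
  | nil => intro d; simp [pvNew]
  | cons i t ih =>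
    intro d
    simp only [List.foldl_cons, pvNew]
    cases hf : pvFid? i with
    | none => simp only [pvStep, hf]; exact ih d
    | some f =>
      by_cases hm : f ∈ d.keys
      · have hc : d.contains f = true := by
          rw [PySem.Dict.contains_eq_decide_mem_keys]; simp [hm]
        have hkeys : (pvStep d i).keys = d.keys := by
          simp only [pvStep, hf, hc]
          split_ifs <;>
            first
              | rfl
              | exact PySem.Dict.keys_insert_of_contains _ _ hc
        rw [ih (pvStep d i), hkeys]
        simp [hm]
      · have hc : d.contains f = false := by
          rw [PySem.Dict.contains_eq_decide_mem_keys]; simp [hm]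
        have hstep : pvStep d i = d.insert f i := by simp [pvStep, hf, hc]
        have hkeys : (pvStep d i).keys = d.keys ++ [f] :=
          hstep ▸ PySem.Dict.keys_insert_of_not_contains d i hc
        rw [ih (pvStep d i), hkeys,
          pvNew_congr t (d.keys ++ [f]) (f :: d.keys) (by intro g; simp [or_comm])]
        simp [hm]

lemma mem_pvNew (xs : List (List (String × String))) :
    ∀ (s : List String) (i : List (String × String)) (f : String),
      i ∈ xs → pvFid? i = some f → f ∈ s ∨ f ∈ pvNew xs s := by
  induction xs with
  | nil => intro _ _ _ h; cases h
  | cons j t ih =>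
    intro s i f hmem hfid
    rcases List.mem_cons.mp hmem with hmem | hmem
    · subst hmem
      simp only [pvNew, hfid]
      by_cases hf : f ∈ s
      · exact .inl hf
      · simp [hf]
    · cases hg : pvFid? j with
      | none =>
        simp only [pvNew, hg]
        exact ih s i f hmem hfid
      | some g =>
        simp only [pvNew, hg]
        by_cases hg' : g ∈ s
        · rw [if_pos hg']
          exact ih s i f hmem hfid
        · rw [if_neg hg']
          rcases ih (g :: s) i f hmem hfid with h | h
          · rcases List.mem_cons.mp h with h | h
            · exact .inr (by simp [h])
            · exact .inl h
          · exact .inr (by simp [h])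

lemma pvNew_exists (xs : List (List (String × String))) :
    ∀ (s : List String) (f : String), f ∈ pvNew xs s →
      f ∉ s ∧ f ≠ "" ∧ ∃ i ∈ xs, pvFid? i = some f := by
  induction xs with
  | nil => intro s f h; simp [pvNew] at h
  | cons j t ih =>
    intro s f h
    simp only [pvNew] at h
    cases hg : pvFid? j with
    | none =>
      rw [hg] at h
      obtain ⟨h1, h2, i, hi, hf⟩ := ih s f h
      exact ⟨h1, h2, i, by simp [hi], hf⟩
    | some g =>
      simp only [hg] at h
      by_cases hg' : g ∈ s
      · rw [if_pos hg'] at h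
        obtain ⟨h1, h2, i, hi, hf⟩ := ih s f h
        exact ⟨h1, h2, i, by simp [hi], hf⟩
      · rw [if_neg hg'] at h
        rcases List.mem_cons.mp h with h | h
        · subst h
          refine ⟨hg', ?_, j, by simp, hg⟩
          simp only [pvFid?] at hg
          cases hl : List.lookup "id" j with
          | none => rw [hl] at hg; cases hg
          | some v =>
            rw [hl] at hg
            by_cases hv : v = ""
            · simp [hv] at hg
            · simp [hv] at hg; exact hg ▸ hv
        · obtain ⟨h1, h2, i, hi, hf⟩ := ih (g :: s) f h
          exact ⟨fun hx => h1 (by simp [hx]), h2, i, by simp [hi], hf⟩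

-- the second pass of A, over a dict containing every non-falsy id of xs, lists chosen values
-- in first-appearance order
lemma second_pass (c : PySem.Dict String (List (String × String)))
    (xs : List (List (String × String))) :
    ∀ (out : List (List (String × String))) (s : List String),
      (∀ i ∈ xs, ∀ f, pvFid? i = some f → f ∈ s ∨ c.contains f = true) →
      (List.foldl (fun (st : List (List (String × String)) × PySem.Set String) item =>
          match List.lookup "id" item with
          | none => st
          | some fid =>
            if fid = "" ∨ fid ∈ st.2 then st
            else if c.contains fid then (st.1 ++ [c.getD fid []], PySem.Set.add st.2 fid)
            else st) (out, s) xs).1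
        = out ++ (pvNew xs s).map (fun f => c.getD f []) := by
  induction xs with
  | nil => intro out s _; simp [pvNew]
  | cons i t ih =>
    intro out s hyp
    simp only [List.foldl_cons, pvNew]
    cases hl : List.lookup "id" i with
    | none =>
      have hfid : pvFid? i = none := by simp [pvFid?, hl]
      rw [hfid]
      exact ih out s (fun j hj f hf => hyp j (by simp [hj]) f hf)
    | some f =>
      by_cases hice : f = ""
      · have hfid : pvFid? i = none := by simp [pvFid?, hl, hice]
        rw [hfid]
        simp only [hice, true_or, if_true]
        exact ih out s (fun j hj g hg => hyp j (by simp [hj]) g hg)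
      · have hfid : pvFid? i = some f := by simp [pvFid?, hl, hice]
        rw [hfid]
        by_cases hfs : f ∈ s
        · simp only [hice, hfs, or_true, if_true]
          exact ih out s (fun j hj g hg => hyp j (by simp [hj]) g hg)
        · have hc : c.contains f = true := by
            rcases hyp i (by simp) f hfid with h | h
            · exact absurd h hfs
            · exact h
          simp only [hice, hfs, or_self, if_false, hc, if_true]
          rw [PySem.Set.add_of_not_mem hfs]
          rw [ih (out ++ [c.getD f []]) (s ++ [f])
            (fun j hj g hg => by
              rcases hyp j (by simp [hj]) g hg with h | h
              · exact .inl (by simp [h])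
              · exact .inr h)]
          rw [pvNew_congr t (s ++ [f]) (f :: s) (by intro g; simp [or_comm])]
          simp

-- what A's first fold stores under key f: first 'personal/preference' item, else first item
lemma fold_get? (xs : List (List (String × String))) :
    ∀ (d : PySem.Dict String (List (String × String))) (f : String), f ≠ "" →
      (List.foldl pvStep d xs).get? f =
        match d.get? f with
        | some v => some (if List.lookup "reason" v = some "personal/preference" then v
                          else (xs.find? (pvPP f)).getD v)
        | none =>
          match xs.find? (pvPP f) with
          | some x => some x
          | none => xs.find? (pvID f) := by
  induction xs with
  | nil =>
    intro d f _
    simp only [List.foldl_nil, List.find?_nil]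
    cases hd : d.get? f with
    | none => rfl
    | some v => simp
  | cons i t ih =>
    intro d f hf
    simp only [List.foldl_cons]
    rw [ih (pvStep d i) f hf]
    cases hl : List.lookup "id" i with
    | none =>
      have hstep : pvStep d i = d := by simp [pvStep, pvFid?, hl]
      have hpp : pvPP f i = false := by simp [pvPP, hl]
      have hid : pvID f i = false := by simp [pvID, hl]
      rw [hstep, List.find?_cons_of_neg (by simp [hpp]), List.find?_cons_of_neg (by simp [hid])]
    | some g =>
      by_cases hgf : g = f
      · subst hgf
        have hfid : pvFid? i = some g := by simp [pvFid?, hl, hf]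
        have hid : pvID g i = true := by simp [pvID, hl]
        by_cases hpp : List.lookup "reason" i = some "personal/preference"
        · have hppi : pvPP g i = true := by simp [pvPP, hl, hpp]
          rw [List.find?_cons_of_pos hppi]
          cases hd : d.get? g with
          | none =>
            have hc : d.contains g = false := by
              rw [PySem.Dict.contains_eq_isSome_get?, hd]; rfl
            have hstep : pvStep d i = d.insert g i := by simp [pvStep, hfid, hc]
            rw [hstep, PySem.Dict.get?_insert_self]
            simp [hpp]
          | some v =>
            have hc : d.contains g = true := by
              rw [PySem.Dict.contains_eq_isSome_get?, hd]; rfl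
            have hgD : d.getD g [] = v := PySem.Dict.getD_of_get?_eq_some d [] hd
            by_cases hv : List.lookup "reason" v = some "personal/preference"
            · have hstep : pvStep d i = d := by simp [pvStep, hfid, hc, hgD, hv]
              rw [hstep, hd]; simp [hv]
            · have hstep : pvStep d i = d.insert g i := by simp [pvStep, hfid, hc, hgD, hpp, hv]
              rw [hstep, PySem.Dict.get?_insert_self]
              simp [hpp, hv]
        · have hppi : pvPP g i = false := by simp [pvPP, hpp]
          rw [List.find?_cons_of_neg (by simp [hppi])]
          cases hd : d.get? g with
          | none =>
            have hc : d.contains g = false := by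
              rw [PySem.Dict.contains_eq_isSome_get?, hd]; rfl
            have hstep : pvStep d i = d.insert g i := by simp [pvStep, hfid, hc]
            rw [hstep, PySem.Dict.get?_insert_self]
            cases hft : t.find? (pvPP g) with
            | some x => simp [hpp]
            | none =>
              rw [List.find?_cons_of_pos hid]
              simp [hpp]
          | some v =>
            have hc : d.contains g = true := by
              rw [PySem.Dict.contains_eq_isSome_get?, hd]; rfl
            have hgD : d.getD g [] = v := PySem.Dict.getD_of_get?_eq_some d [] hd
            have hstep : pvStep d i = d := by simp [pvStep, hfid, hc, hgD, hpp]
            rw [hstep, hd]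
      · -- g ≠ f: neither the dict entry for f nor the find?s over (i :: t) see i
        have hpp : pvPP f i = false := by simp [pvPP, hl, hgf]
        have hid : pvID f i = false := by simp [pvID, hl, hgf]
        have hget : (pvStep d i).get? f = d.get? f := by
          by_cases hg0 : g = ""
          · have hfid : pvFid? i = none := by simp [pvFid?, hl, hg0]
            simp [pvStep, hfid]
          · have hfid : pvFid? i = some g := by simp [pvFid?, hl, hg0]
            simp only [pvStep, hfid]
            split_ifs <;>
              first
                | rfl
                | exact PySem.Dict.get?_insert_of_ne d i (fun h => hgf h.symm)
        rw [hget, List.find?_cons_of_neg (by simp [hpp]), List.find?_cons_of_neg (by simp [hid])]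

-- for a first-appearing id f, A's dict holds pvBest f xs
lemma chosen_getD (xs : List (List (String × String))) (f : String)
    (hmem : f ∈ pvNew xs []) :
    (List.foldl pvStep PySem.Dict.empty xs).getD f [] = pvBest f xs := by
  obtain ⟨-, hne, i, hi, hfid⟩ := pvNew_exists xs [] f hmem
  have hidtrue : pvID f i = true := by
    simp only [pvFid?] at hfid
    cases hl : List.lookup "id" i with
    | none => rw [hl] at hfid; cases hfid
    | some v =>
      rw [hl] at hfid
      by_cases hv : v = ""
      · simp [hv] at hfid
      · simp [hv] at hfid; simp [pvID, hl, hfid]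
  have hfind : (xs.find? (pvID f)).isSome := List.find?_isSome.mpr ⟨i, hi, hidtrue⟩
  have h := fold_get? xs PySem.Dict.empty f hne
  rw [PySem.Dict.get?_empty] at h
  cases hpp : xs.find? (pvPP f) with
  | some x =>
    rw [hpp] at h
    rw [PySem.Dict.getD_of_get?_eq_some _ [] h, pvBest, hpp]
  | none =>
    rw [hpp] at h
    cases hid : xs.find? (pvID f) with
    | none => rw [hid] at hfind; cases hfind
    | some y =>
      rw [hid] at h
      rw [PySem.Dict.getD_of_get?_eq_some _ [] h, pvBest, hpp, hid]
      rfl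

-- find? through a filter that keeps everything the predicate could match
lemma find?_filter_keep {α : Type} (l : List α) (pred keep : α → Bool)
    (h : ∀ x, pred x = true → keep x = true) :
    (l.filter keep).find? pred = l.find? pred := by
  induction l with
  | nil => rfl
  | cons a t ih =>
    by_cases hp : pred a = true
    · rw [List.filter_cons_of_pos (h a hp), List.find?_cons_of_pos hp, List.find?_cons_of_pos hp]
    · by_cases hk : keep a = true
      · rw [List.filter_cons_of_pos hk, List.find?_cons_of_neg hp, List.find?_cons_of_neg hp, ih]
      · rw [List.filter_cons_of_neg (by simp_all), List.find?_cons_of_neg hp, ih]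

-- pvBest ignores a head item whose id is not g
lemma pvBest_cons_skip (g : String) (i : List (String × String))
    (t : List (List (String × String))) (h : List.lookup "id" i ≠ some g) :
    pvBest g (i :: t) = pvBest g t := by
  have hb : (List.lookup "id" i == some g) = false := by simpa using h
  have h1 : ¬ pvPP g i = true := by simp [pvPP, hb]
  have h2 : ¬ pvID g i = true := by simp [pvID, hb]
  simp only [pvBest, List.find?_cons_of_neg h1, List.find?_cons_of_neg h2]

-- dropping the items with id f does not disturb the first occurrences of the other ids
lemma pvNew_filter (t : List (List (String × String))) (f : String) (hf : f ≠ "") :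
    ∀ s : List String,
      pvNew (t.filter (fun x => !(List.lookup "id" x == some f))) s = pvNew t (f :: s) := by
  induction t with
  | nil => intro s; rfl
  | cons j u ih =>
    intro s
    cases hl : List.lookup "id" j with
    | none =>
      rw [List.filter_cons_of_pos (by simp [hl])]
      simp only [pvNew, pvFid?, hl]
      exact ih s
    | some g =>
      by_cases hgf : g = f
      · subst hgf
        rw [List.filter_cons_of_neg (by simp [hl])]
        have hfid : pvFid? j = some g := by simp [pvFid?, hl, hf]
        simp only [pvNew, hfid, List.mem_cons, true_or, if_true]
        exact ih s
      · rw [List.filter_cons_of_pos (by simp [hl, hgf])]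
        by_cases hg0 : g = ""
        · have hfid : pvFid? j = none := by simp [pvFid?, hl, hg0]
          simp only [pvNew, hfid]
          exact ih s
        · have hfid : pvFid? j = some g := by simp [pvFid?, hl, hg0]
          simp only [pvNew, hfid, List.mem_cons, hgf, false_or]
          by_cases hgs : g ∈ s
          · simp only [hgs, if_true]
            exact ih s
          · simp only [hgs, if_false]
            rw [ih (g :: s), pvNew_congr u (f :: g :: s) (g :: f :: s) (by intro x; simp; tauto)]

-- B's worklist loop computes first-appearance ids mapped through pvBest
lemma altGo_spec (n : Nat) :
    ∀ (p : List (List (String × String))), p.length ≤ n →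
    ∀ out : List (List (String × String)),
      altGo out p = out ++ (pvNew p []).map (fun g => pvBest g p) := by
  induction n with
  | zero =>
    intro p hp out
    have : p = [] := List.length_eq_zero_iff.mp (Nat.le_zero.mp hp)
    subst this
    rw [altGo.eq_def]
    simp [pvNew]
  | succ n ih =>
    intro p hp out
    cases p with
    | nil => rw [altGo.eq_def]; simp [pvNew]
    | cons i t =>
      rw [altGo.eq_def]
      cases hl : List.lookup "id" i with
      | none =>
        simp only [hl]
        have hnil : pvNew (i :: t) [] = pvNew t [] := by simp [pvNew, pvFid?, hl]
        rw [ih t (by simpa using Nat.le_of_succ_le_succ hp) out, hnil]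
        congr 1
        refine List.map_congr_left fun g hg => ?_
        exact (pvBest_cons_skip g i t (by simp [hl])).symm
      | some f =>
        simp only [hl]
        by_cases hf0 : f = ""
        · rw [if_pos hf0]
          have hnil : pvNew (i :: t) [] = pvNew t [] := by simp [pvNew, pvFid?, hl, hf0]
          rw [ih t (by simpa using Nat.le_of_succ_le_succ hp) out, hnil]
          congr 1
          refine List.map_congr_left fun g hg => ?_
          obtain ⟨-, hgne, -⟩ := pvNew_exists t [] g hg
          refine (pvBest_cons_skip g i t ?_).symm
          rw [hl, hf0]
          exact fun h => hgne (Option.some.inj h).symm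
        · rw [if_neg hf0]
          have hlen : (t.filter (fun x => !(List.lookup "id" x == some f))).length ≤ n := by
            have h1 := List.length_filter_le (fun x => !(List.lookup "id" x == some f)) t
            have h2 : t.length + 1 ≤ n + 1 := by simpa using hp
            omega
          rw [ih _ hlen]
          have hnew : pvNew (i :: t) [] = f :: pvNew t [f] := by
            simp [pvNew, pvFid?, hl, hf0]
          rw [hnew, pvNew_filter t f hf0 []]
          simp only [List.map_cons, List.append_assoc, List.singleton_append]
          congr 2
          · -- the emitted best equals pvBest f (i :: t)
            show (if List.lookup "reason" i = some "personal/preference" then i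
                  else (List.find? (pvPP f) t).getD i) = pvBest f (i :: t)
            have hidi : pvID f i = true := by simp [pvID, hl]
            by_cases hpp : List.lookup "reason" i = some "personal/preference"
            · have hppi : pvPP f i = true := by simp [pvPP, hl, hpp]
              rw [if_pos hpp]
              simp [pvBest, List.find?_cons_of_pos hppi]
            · have hppi : ¬ pvPP f i = true := by simp [pvPP, hpp]
              rw [if_neg hpp]
              simp only [pvBest, List.find?_cons_of_neg hppi]
              cases hft : List.find? (pvPP f) t with
              | some x => simp
              | none => rw [List.find?_cons_of_pos hidi]; simp
          · -- tail ids get the same best in the filtered tail as in (i :: t)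
            refine List.map_congr_left fun g hg => ?_
            obtain ⟨hgnf, hgne, -⟩ := pvNew_exists t [f] g hg
            have hgf : g ≠ f := by intro h; exact hgnf (by simp [h])
            have hkeep : ∀ x, pvPP g x = true → (!(List.lookup "id" x == some f)) = true := by
              intro x hx
              simp only [pvPP, Bool.and_eq_true, beq_iff_eq] at hx
              simp [hx.1, hgf]
            have hkeep2 : ∀ x, pvID g x = true → (!(List.lookup "id" x == some f)) = true := by
              intro x hx
              simp only [pvID, beq_iff_eq] at hx
              simp [hx, hgf]
            rw [show pvBest g (List.filter (fun x => !(List.lookup "id" x == some f)) t)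
                  = pvBest g t from by
                simp only [pvBest, find?_filter_keep _ _ _ hkeep, find?_filter_keep _ _ _ hkeep2],
              pvBest_cons_skip g i t (by rw [hl]; exact fun h => hgf (Option.some.inj h).symm)]

-- ===== VERDICT =====
theorem dedup_skipped_by_id_spec : Claim_equal_dedup_skipped_by_id := by
  intro xs _
  unfold Spec_dedup_skipped_by_id dedup_skipped_by_id dedup_skipped_by_id_alt
  simp only [pvStep_eq_A]
  set c := List.foldl pvStep PySem.Dict.empty xs with hc
  have hkeys : c.keys = pvNew xs [] := by
    rw [hc, keys_fold xs PySem.Dict.empty, PySem.Dict.keys_empty]; rfl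
  have hyp : ∀ i ∈ xs, ∀ f, pvFid? i = some f → f ∈ ([] : List String) ∨ c.contains f = true := by
    intro i hi f hf
    refine .inr ?_
    rw [PySem.Dict.contains_eq_decide_mem_keys, hkeys]
    rcases mem_pvNew xs [] i f hi hf with h | h
    · cases h
    · simp [h]
  rw [second_pass c xs [] PySem.Set.empty hyp, altGo_spec xs.length xs (le_refl _) []]
  simp only [List.nil_append]
  exact List.map_congr_left fun g hg => chosen_getD xs g hg
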